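-- pv_equiv track=rewrite | github.com/margotphoenix/curly-brackets | curlybrackets/utilities.py | seed_order
-- ===== SOURCE A (Python) =====
-- def seed_order(size):
--     order = [1]
--     while len(order) < size:
--         new_order = []
--         L = len(order)*2+1
--         for j in order:
--             new_order.append(j)
--             new_order.append(L-j)
--         order = new_order
--     return order
-- ===== SOURCE B (Python) =====
-- def seed_order(size):
--     n = 1
--     while n < size:
--         n *= 2
--     def value(p, m):
--         if m <= 1:
--             return 1
--         v = value(p >> 1, m >> 1)
--         return m + 1 - v if p & 1 else v
--     return [value(p, n) for p in range(n)]
-- ===== Notes on version B (the rewrite author's own statement) =====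
-- stated objective: alternative
-- what changed: Replaces the batch-doubling list rebuild with a per-position computation: the bracket length n (next power of two, min 1) is found first, then each seed is derived independently from its position's bits by recursive halving.
import Mathlib
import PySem

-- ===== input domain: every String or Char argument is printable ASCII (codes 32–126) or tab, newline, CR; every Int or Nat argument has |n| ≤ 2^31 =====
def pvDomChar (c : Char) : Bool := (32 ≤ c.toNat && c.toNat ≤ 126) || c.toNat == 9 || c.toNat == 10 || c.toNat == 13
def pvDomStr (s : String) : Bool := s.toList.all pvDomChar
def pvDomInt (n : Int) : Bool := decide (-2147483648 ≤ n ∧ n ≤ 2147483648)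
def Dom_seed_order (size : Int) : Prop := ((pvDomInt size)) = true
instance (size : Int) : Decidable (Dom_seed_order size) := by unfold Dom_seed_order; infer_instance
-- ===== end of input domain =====

-- B replaces A's batch list-doubling loop by computing each position's seed
-- independently from its bits (alternative decomposition, similar cost).

-- ===== PORT A =====
-- inner 'for j in order: new_order.append(j); new_order.append(L-j)'
def seedStep (order : List Int) : List Int :=
  order.foldl (fun acc j => acc ++ [j, (order.length * 2 + 1 : Int) - j]) []

-- (cited by seedLoop's termination proof)
theorem seedStep_eq_flatMap (order : List Int) :
    seedStep order = order.flatMap (fun j => [j, (order.length * 2 + 1 : Int) - j]) := by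
  unfold seedStep
  rw [PySem.List.foldl_append_eq_flatMap]
  simp

-- (cited by seedLoop's termination proof)
theorem seedStep_length (order : List Int) : (seedStep order).length = order.length * 2 := by
  rw [seedStep_eq_flatMap]
  generalize (order.length * 2 + 1 : Int) = L
  induction order with
  | nil => simp
  | cons x xs ih => simp [List.flatMap_cons] at ih ⊢; omega

-- 'while len(order) < size: order = new_order'; the nonemptiness proof only
-- serves termination (the list's length doubles each round)
def seedLoop (size : Int) (order : List Int) (h : order ≠ []) : List Int :=
  if hlt : (order.length : Int) < size then
    seedLoop size (seedStep order)
      (by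
        intro hnil
        have := seedStep_length order
        rw [hnil] at this
        simp at this
        exact h this)
  else order
termination_by (size - order.length).toNat
decreasing_by
  have hlen := seedStep_length order
  have hpos : 0 < order.length := List.length_pos_iff.mpr h
  rw [hlen]
  omega

def seed_order (size : Int) : List Int := seedLoop size [1] (by simp)

-- ===== PORT B =====
-- 'n = 1; while n < size: n *= 2'
def nextPow (size : Int) (n : Nat) (hn : 0 < n) : Nat :=
  if h : (n : Int) < size then nextPow size (n * 2) (by omega) else n
termination_by (size - n).toNat
decreasing_by omega

-- 'def value(p, m)'
def seedVal (p m : Nat) : Int :=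
  if m ≤ 1 then 1
  else
    let v := seedVal (p / 2) (m / 2)
    if p % 2 = 1 then (m : Int) + 1 - v else v

def seed_order_alt (size : Int) : List Int :=
  let n := nextPow size 1 (by omega)
  (List.range n).map (fun p => seedVal p n)

-- ===== PRECONDITION & SPEC =====
def Spec_seed_order (size : Int) (out : List Int) : Prop := out = seed_order_alt size
instance (size : Int) (out : List Int) : Decidable (Spec_seed_order size out) := by unfold Spec_seed_order; infer_instance

-- ===== CLAIM (what is proved, stated in full; the proofs are below) =====
def Claim_equal_seed_order : Prop := ∀ (size : Int), Dom_seed_order size → Spec_seed_order size (seed_order size)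

-- ===== LEMMAS AND PROOFS =====

theorem seedLoop_congr (size : Int) (o1 o2 : List Int) (h1 : o1 ≠ []) (h2 : o2 ≠ [])
    (e : o1 = o2) : seedLoop size o1 h1 = seedLoop size o2 h2 := by
  subst e; rfl

theorem levelList_ne_nil (m : Nat) (hm : 0 < m) :
    (List.range m).map (fun p => seedVal p m) ≠ [] := by
  have hlen : ((List.range m).map (fun p => seedVal p m)).length = m := by simp
  intro hnil
  rw [hnil] at hlen
  simp at hlen
  omega

theorem myRangeDouble (m : Nat) :
    List.range (m * 2) = (List.range m).flatMap (fun q => [2 * q, 2 * q + 1]) := by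
  induction m with
  | zero => simp
  | succ m ih =>
    have h1 : (m + 1) * 2 = (m * 2 + 1) + 1 := by omega
    rw [h1, List.range_succ, List.range_succ, List.range_succ, ih]
    simp
    omega

theorem seedVal_double (p m : Nat) (hm : 0 < m) :
    seedVal p (m * 2) =
      if p % 2 = 1 then (m * 2 : Int) + 1 - seedVal (p / 2) m else seedVal (p / 2) m := by
  rw [seedVal]
  have h1 : ¬ (m * 2 ≤ 1) := by omega
  have h2 : m * 2 / 2 = m := by omega
  simp [h1, h2]

-- one doubling round maps the level-m seed list to the level-(2m) seed list
theorem seedStep_level (m : Nat) (hm : 0 < m) :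
    seedStep ((List.range m).map (fun p => seedVal p m)) =
      (List.range (m * 2)).map (fun p => seedVal p (m * 2)) := by
  rw [seedStep_eq_flatMap, myRangeDouble]
  simp only [List.length_map, List.length_range, List.flatMap_map, List.map_flatMap]
  apply List.flatMap_congr
  intro q _
  have he : (2 * q) % 2 = 0 := by omega
  have ho : (2 * q + 1) % 2 = 1 := by omega
  have hq : 2 * q / 2 = q := by omega
  have hq1 : (2 * q + 1) / 2 = q := by omega
  simp only [List.map_cons, List.map_nil]
  rw [seedVal_double (2 * q) m hm, seedVal_double (2 * q + 1) m hm]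
  simp [he, ho, hq, hq1]

-- the two recursions run in lockstep: the loop on the level-m seed list
-- returns the level-N seed list, N = nextPow size m
theorem seedLoop_eq (size : Int) (m : Nat) (hm : 0 < m) (hne : (List.range m).map (fun p => seedVal p m) ≠ []) :
    seedLoop size ((List.range m).map (fun p => seedVal p m)) hne =
      (List.range (nextPow size m hm)).map (fun p => seedVal p (nextPow size m hm)) := by
  rw [seedLoop, nextPow]
  simp only [List.length_map, List.length_range]
  by_cases hc : (m : Int) < size
  · rw [dif_pos hc, dif_pos hc]
    exact (seedLoop_congr size _ _ _ (levelList_ne_nil (m * 2) (by omega))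
        (seedStep_level m hm)).trans
      (seedLoop_eq size (m * 2) (by omega) (levelList_ne_nil (m * 2) (by omega)))
  · rw [dif_neg hc, dif_neg hc]
termination_by (size - m).toNat
decreasing_by omega

-- ===== VERDICT (by name: the statement is the Claim_ definition above) =====
theorem seed_order_spec : Claim_equal_seed_order := by
  intro size _
  unfold Spec_seed_order seed_order seed_order_alt
  have hbase : (List.range 1).map (fun p => seedVal p 1) = [1] := by
    simp [seedVal]
  exact (seedLoop_congr size [1] _ (by simp) (levelList_ne_nil 1 (by omega))
      hbase.symm).trans (seedLoop_eq size 1 (by omega) _)
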